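-- pv_equiv track=rewrite | github.com/hyunjun/practice | python/problem-heap/jesse_and_cookies.py | cookies1
-- ===== SOURCE A (Python) =====
-- import heapq
--
-- def cookies1(k, A):
--     arr = [a for a in sorted(A) if a < k]
--     if len(arr) < 2:
--         return -1
--     heapq.heapify(arr)
--     cnt = 0
--     while 0 < len(arr):
--         if 1 == len(arr):
--             return -1
--         n = heapq.heappop(arr) + heapq.heappop(arr) * 2
--         if n < k:
--             heapq.heappush(arr, n)
--         cnt += 1
--     return cnt
-- ===== SOURCE B (Python) =====
-- def cookies1(k, A):
--     arr = sorted(a for a in A if a < k)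
--     if len(arr) < 2:
--         return -1
--     cnt = 0
--     while len(arr) > 1:
--         x, y, *rest = arr
--         n = x + 2 * y
--         if n >= k:
--             arr = rest
--         else:
--             arr = [e for e in rest if e <= n] + [n] + [e for e in rest if e > n]
--         cnt += 1
--     return -1 if arr else cnt
-- ===== Notes on version B (the rewrite author's own statement) =====
-- stated objective: simpler
-- what changed: Replaces the binary heap (heapify/heappop/heappush) with a plain sorted list rebuilt each round: filter before sorting, destructure the two front (smallest) elements, and re-insert a still-too-small merged cookie at its sorted position by partitioning the rest with two filters instead of heap sift operations.
import Mathlib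
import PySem

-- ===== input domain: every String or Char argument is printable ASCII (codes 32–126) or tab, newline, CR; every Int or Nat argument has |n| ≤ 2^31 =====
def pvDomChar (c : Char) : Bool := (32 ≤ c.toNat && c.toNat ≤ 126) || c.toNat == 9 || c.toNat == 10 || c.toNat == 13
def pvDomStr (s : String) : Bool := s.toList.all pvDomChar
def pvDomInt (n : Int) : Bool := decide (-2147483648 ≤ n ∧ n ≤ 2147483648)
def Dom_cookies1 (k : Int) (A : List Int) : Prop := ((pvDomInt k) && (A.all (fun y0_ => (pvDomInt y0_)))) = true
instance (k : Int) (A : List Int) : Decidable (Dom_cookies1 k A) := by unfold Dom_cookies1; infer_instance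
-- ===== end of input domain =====

-- B replaces heapq's binary heap with a plain sorted list rebuilt each round (filter
-- before sorting; merged cookie re-inserted by partitioning with two filters): simpler, not faster.


-- ===== PORT A =====
-- heapq is ported by its contract (exact for Int elements, whose equal values are
-- indistinguishable): the heap is kept as a bag (unordered list); heappop removes the
-- first occurrence of the minimum value, heappush appends, heapify is the identity.
def pyMin (m : Int) : List Int → Int
  | [] => m
  | x :: xs => pyMin (min m x) xs

def popMin : List Int → Option (Int × List Int)
  | [] => none
  | x :: xs => let m := pyMin x xs; some (m, (x :: xs).erase m)

-- the while loop of A; fuel = current length bounds the iteration count (length drops each turn)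
def aloop (k : Int) : Nat → List Int → Int → Int
  | _, [], c => c
  | _, [_], _ => -1
  | 0, _ :: _ :: _, _ => -1   -- fuel exhausted; unreachable when fuel ≥ length
  | f + 1, x :: y :: t, c =>
      match popMin (x :: y :: t) with
      | none => -1
      | some (m1, h1) =>
        match popMin h1 with
        | none => -1
        | some (m2, h2) =>
          let n := m1 + m2 * 2
          aloop k f (if n < k then h2 ++ [n] else h2) (c + 1)

def cookies1 (k : Int) (A : List Int) : Int :=
  let arr := (PySem.List.sorted A (fun a => a) false).filter (fun a => decide (a < k))
  if arr.length < 2 then -1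
  else aloop k arr.length arr 0

-- ===== PORT B =====
-- the while loop of Source B: structural descent on the sorted list, no fuel, no heap;
-- re-insertion partitions the tail with two filter passes as in Source B
-- (two_filter_length_le is cited by brun's decreasing_by)
theorem two_filter_length_le {a : Type} (p q : a -> Bool)
    (hpq : forall x, p x = true -> q x = false) : forall (l : List a),
    (l.filter p).length + (l.filter q).length <= l.length
  | [] => by simp
  | x :: xs => by
    have ih := two_filter_length_le p q hpq xs
    by_cases hp : p x = true
    · simp [hp, hpq x hp]; omega
    · simp only [List.filter_cons]
      rw [if_neg (by simp_all)]
      by_cases hq : q x = true <;> simp [hq] <;> omega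

def brun (k : Int) : List Int → Int → Int
  | [], cnt => cnt
  | [_], _ => -1
  | x :: y :: rest, cnt =>
      let n := x + 2 * y
      brun k
        (if k ≤ n then rest
         else rest.filter (fun e => decide (e ≤ n)) ++ n :: rest.filter (fun e => decide (n < e)))
        (cnt + 1)
termination_by l _ => l.length
decreasing_by
  split
  · simp only [List.length_cons]; omega
  · have h2f := two_filter_length_le (fun e : Int => decide (e ≤ x + 2 * y))
      (fun e : Int => decide (x + 2 * y < e)) (by intro e; simp) rest
    simp only [List.length_cons, List.length_append, List.length_unattach,
      ← List.countP_eq_length_filter] at h2f ⊢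
    rw [List.countP_attach (p := fun e : Int => decide (e ≤ x + 2 * y)),
      List.countP_attach (p := fun e : Int => decide (x + 2 * y < e))]
    omega

def cookies1_alt (k : Int) (A : List Int) : Int :=
  let arr := PySem.List.sorted (A.filter (fun a => decide (a < k))) (fun a => a) false
  if arr.length < 2 then -1
  else brun k arr 0

-- ===== PRECONDITION & SPEC =====
def Spec_cookies1 (k : Int) (A : List Int) (out : Int) : Prop := out = cookies1_alt k A
instance (k : Int) (A : List Int) (out : Int) : Decidable (Spec_cookies1 k A out) := by unfold Spec_cookies1; infer_instance

-- ===== CLAIM =====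
def Claim_equal_cookies1 : Prop := ∀ (k : Int) (A : List Int), Dom_cookies1 k A → Spec_cookies1 k A (cookies1 k A)

-- ===== LEMMAS AND PROOFS =====

-- proof-side abstraction of Source B's two-filter re-insertion (on a sorted tail)
def insortB (n : Int) : List Int → List Int
  | [] => [n]
  | x :: xs => if n < x then n :: x :: xs else x :: insortB n xs

theorem filter_insert_eq_insortB (n : Int) (l : List Int) (hs : l.Pairwise (· ≤ ·)) :
    l.filter (fun e => decide (e ≤ n)) ++ n :: l.filter (fun e => decide (n < e)) = insortB n l := by
  induction l with
  | nil => simp [insortB]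
  | cons x xs ih =>
    obtain ⟨hx, hxs⟩ := List.pairwise_cons.mp hs
    by_cases h : n < x
    · have h1 : xs.filter (fun e => decide (e ≤ n)) = [] := by
        rw [List.filter_eq_nil_iff]; intro e he; have := hx e he; simp; omega
      have h2 : xs.filter (fun e => decide (n < e)) = xs := by
        rw [List.filter_eq_self]; intro e he; have := hx e he; simp; omega
      simp [insortB, h, h1, h2, show ¬ x ≤ n by omega]
    · simp only [insortB, if_neg h]
      rw [← ih hxs]
      simp [show x ≤ n by omega, show ¬ n < x from h]

theorem pyMin_mem (m : Int) (l : List Int) : pyMin m l = m ∨ pyMin m l ∈ l := by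
  induction l generalizing m with
  | nil => left; rfl
  | cons x xs ih =>
    rcases ih (min m x) with h | h
    · rcases le_total m x with hle | hle
      · left; simpa [pyMin, min_eq_left hle] using h
      · right; simp [pyMin] at h ⊢; left; rw [h, min_eq_right hle]
    · right; simp [pyMin]; right; exact h

theorem pyMin_le (m : Int) (l : List Int) :
    pyMin m l ≤ m ∧ ∀ y ∈ l, pyMin m l ≤ y := by
  induction l generalizing m with
  | nil => exact ⟨le_refl m, by simp⟩
  | cons x xs ih =>
    obtain ⟨h1, h2⟩ := ih (min m x)
    refine ⟨le_trans h1 (min_le_left _ _), ?_⟩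
    intro y hy
    rcases List.mem_cons.mp hy with rfl | hy
    · exact le_trans h1 (min_le_right _ _)
    · exact h2 y hy

-- the minimum of a list that is a permutation of a sorted list a :: rest is a
theorem pyMin_of_perm_sorted (x a : Int) (xs rest : List Int)
    (hp : (x :: xs).Perm (a :: rest))
    (hs : (a :: rest).Pairwise (· ≤ ·)) : pyMin x xs = a := by
  have hmem : pyMin x xs ∈ a :: rest := by
    rcases pyMin_mem x xs with h | h
    · exact hp.mem_iff.mp (by simp [h])
    · exact hp.mem_iff.mp (by simp [h])
  have hle : ∀ y ∈ a :: rest, a ≤ y := by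
    intro y hy
    rcases List.mem_cons.mp hy with rfl | hy
    · exact le_refl _
    · exact (List.pairwise_cons.mp hs).1 y hy
  have ha : a ∈ x :: xs := hp.mem_iff.mpr (by simp)
  obtain ⟨h1, h2⟩ := pyMin_le x xs
  have h3 : pyMin x xs ≤ a := by
    rcases List.mem_cons.mp ha with rfl | h
    · exact h1
    · exact h2 a h
  exact le_antisymm h3 (hle _ hmem)

theorem insortB_perm (n : Int) (l : List Int) : (insortB n l).Perm (n :: l) := by
  induction l with
  | nil => simp [insortB]
  | cons x xs ih =>
    by_cases h : n < x
    · simp [insortB, h]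
    · simpa [insortB, h] using ((ih.cons x).trans (List.Perm.swap n x xs))

theorem insortB_sorted (n : Int) (l : List Int) (hs : l.Pairwise (· ≤ ·)) :
    (insortB n l).Pairwise (· ≤ ·) := by
  induction l with
  | nil => simp [insortB]
  | cons x xs ih =>
    obtain ⟨hx, hxs⟩ := List.pairwise_cons.mp hs
    by_cases h : n < x
    · rw [insortB, if_pos h]
      refine List.pairwise_cons.mpr ⟨?_, hs⟩
      intro y hy
      rcases List.mem_cons.mp hy with rfl | hy
      · exact le_of_lt h
      · exact le_trans (le_of_lt h) (hx y hy)
    · rw [insortB, if_neg h]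
      refine List.pairwise_cons.mpr ⟨?_, ih hxs⟩
      intro y hy
      rcases List.mem_cons.mp ((insortB_perm n xs).mem_iff.mp hy) with rfl | hy
      · exact le_of_not_gt h
      · exact hx y hy

-- main loop equivalence: A's bag-heap loop equals B's sorted-list recursion
theorem loop_eq (k : Int) (f : Nat) (h s : List Int) (c : Int)
    (hp : h.Perm s) (hs : s.Pairwise (· ≤ ·)) (hf : h.length ≤ f) :
    aloop k f h c = brun k s c := by
  induction f generalizing h s c with
  | zero =>
    have h0 : h = [] := List.length_eq_zero_iff.mp (Nat.le_zero.mp hf)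
    subst h0
    have s0 : s = [] := hp.nil_eq.symm
    subst s0
    simp [aloop, brun]
  | succ f ih =>
    match h, s, hp.length_eq with
    | [], s, hlen =>
      have : s = [] := List.length_eq_zero_iff.mp hlen.symm
      subst this; simp [aloop, brun]
    | [x], s, hlen =>
      match s, hlen with
      | [y], _ => simp [aloop, brun]
    | x :: x' :: xs, s, hlen =>
      match s, hlen with
      | a :: b :: rest, _ =>
        have hm1 : pyMin x (x' :: xs) = a :=
          pyMin_of_perm_sorted x a (x' :: xs) (b :: rest) hp hs
        have hp1 : ((x :: x' :: xs).erase a).Perm (b :: rest) := by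
          have := hp.erase a
          simpa [List.erase_cons_head] using this
        have hs1 : (b :: rest).Pairwise (· ≤ ·) := (List.pairwise_cons.mp hs).2
        have hlen1 : ((x :: x' :: xs).erase a).length = (b :: rest).length :=
          hp1.length_eq
        obtain ⟨y, ys, hys⟩ : ∃ y ys, (x :: x' :: xs).erase a = y :: ys := by
          cases he : (x :: x' :: xs).erase a with
          | nil => rw [he] at hlen1; simp at hlen1
          | cons y ys => exact ⟨y, ys, rfl⟩
        have hpyys : (y :: ys).Perm (b :: rest) := hys ▸ hp1
        have hm2 : pyMin y ys = b :=
          pyMin_of_perm_sorted y b ys rest hpyys hs1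
        have hp2 : ((y :: ys).erase b).Perm rest := by
          have := hpyys.erase b
          simpa [List.erase_cons_head] using this
        have hs2 : rest.Pairwise (· ≤ ·) := (List.pairwise_cons.mp hs1).2
        have e1 : popMin (x :: x' :: xs) = some (a, y :: ys) := by
          simp [popMin, hm1, hys]
        have e2 : popMin (y :: ys) = some (b, (y :: ys).erase b) := by
          simp [popMin, hm2]
        rw [show aloop k (f + 1) (x :: x' :: xs) c =
            aloop k f (if a + b * 2 < k then ((y :: ys).erase b) ++ [a + b * 2]
                       else ((y :: ys).erase b)) (c + 1) by
          simp only [aloop, e1, e2]]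
        have hblock : brun k (a :: b :: rest) c =
            brun k (if k ≤ a + 2 * b then rest
                    else rest.filter (fun e => decide (e ≤ a + 2 * b)) ++
                      (a + 2 * b) :: rest.filter (fun e => decide (a + 2 * b < e))) (c + 1) := by
          rw [brun]
        rw [hblock]
        have hn : a + b * 2 = a + 2 * b := by ring
        have hlenq : ((y :: ys).erase b).length = rest.length := hp2.length_eq
        have hlr : xs.length = rest.length := by
          have := hp.length_eq; simp at this; omega
        have hfx : xs.length + 2 ≤ f + 1 := by simpa using hf
        by_cases hcase : a + b * 2 < k
        · rw [if_pos hcase, if_neg (show ¬ k ≤ a + 2 * b by omega),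
            filter_insert_eq_insortB _ _ hs2]
          refine ih _ _ _ ?_ (insortB_sorted _ _ hs2) ?_
          · rw [hn]
            exact (List.perm_append_singleton _ _).trans
              ((hp2.cons _).trans (insortB_perm _ _).symm)
          · simp [hlenq]; omega
        · rw [if_neg hcase, if_pos (show k ≤ a + 2 * b by omega)]
          exact ih _ _ _ hp2 hs2 (by simp [hlenq]; omega)

-- A filters a sorted list, B sorts a filtered list: both are the same sorted list
theorem arr_eq (k : Int) (A : List Int) :
    (PySem.List.sorted A (fun a => a) false).filter (fun a => decide (a < k)) =
      PySem.List.sorted (A.filter (fun a => decide (a < k))) (fun a => a) false := by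
  refine (PySem.List.sorted_id_eq_of_perm_of_pairwise _ _ ?_ ?_).symm
  · exact (PySem.List.sorted_perm A (fun a => a) false).filter _
  · exact (PySem.List.sorted_pairwise A (fun a => a)).filter _

-- ===== VERDICT =====
theorem cookies1_spec : Claim_equal_cookies1 := by
  intro k A _
  unfold Spec_cookies1 cookies1 cookies1_alt
  simp only [← arr_eq k A]
  set arr := (PySem.List.sorted A (fun a => a) false).filter (fun a => decide (a < k)) with harr
  by_cases h : arr.length < 2
  · simp [h]
  · simp only [h, if_false]
    have hs : arr.Pairwise (· ≤ ·) :=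
      (PySem.List.sorted_pairwise A (fun a => a)).filter _
    exact loop_eq k arr.length arr arr 0 (List.Perm.refl arr) hs (le_refl _)
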